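-- pv_equiv track=rewrite | github.com/itsVerix/StaticCodeAnalyzer | checks.py | unnecessary_semicolon
-- ===== SOURCE A (Python) =====
-- def unnecessary_semicolon(line):
--     # Remove string literals from consideration to avoid false positives
--     line_without_strings = ""
--     in_string = False
--     string_char = ''
--     for char in line:
--         if char in ('"', "'") and not in_string:
--             in_string = True
--             string_char = char
--         elif char == string_char and in_string:
--             in_string = False
--             string_char = ''
--         if not in_string:
--             line_without_strings += char
--
--     # Now check for semicolons outside of strings
--     index = line_without_strings.find('#')
--     if index != -1:
--         # Ignore everything after the comment symbol
--         line_without_strings = line_without_strings[:index]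
--
--     if ';' in line_without_strings:
--         # Simplified check: If there's a semicolon not in a string or comment, consider it unnecessary
--         return True
--     return False
-- ===== SOURCE B (Python) =====
-- def unnecessary_semicolon(line):
--     # Single pass, early exit: track the open quote; outside strings, '#' ends the scan, ';' triggers.
--     quote = None
--     for char in line:
--         if quote is None:
--             if char == '#':
--                 return False
--             if char == ';':
--                 return True
--             if char == '"' or char == "'":
--                 quote = char
--         elif char == quote:
--             quote = None
--     return False
-- ===== Notes on version B (the rewrite author's own statement) =====
-- stated objective: simpler
-- what changed: A builds a quote-stripped copy of the line, then locates the comment start in it and finally runs a semicolon membership test (three passes and an intermediate string); B is a single early-exiting scan that keeps only the current open quote and decides at the first unquoted comment mark or semicolon.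
import Mathlib
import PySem

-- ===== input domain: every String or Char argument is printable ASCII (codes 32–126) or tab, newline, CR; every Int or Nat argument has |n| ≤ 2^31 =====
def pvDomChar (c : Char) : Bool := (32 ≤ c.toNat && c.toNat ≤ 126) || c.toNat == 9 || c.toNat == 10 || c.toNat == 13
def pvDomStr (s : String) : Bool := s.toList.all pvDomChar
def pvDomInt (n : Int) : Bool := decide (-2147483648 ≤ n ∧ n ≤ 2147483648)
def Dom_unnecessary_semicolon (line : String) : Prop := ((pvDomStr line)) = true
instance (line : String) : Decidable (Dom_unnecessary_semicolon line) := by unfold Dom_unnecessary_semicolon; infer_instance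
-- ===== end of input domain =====

-- B replaces A's build-stripped-string / find('#') / ';'-membership pipeline (three passes over the
-- data) by a single early-exiting scan holding only the current open quote; objective: simpler.

-- ===== PORT A =====
-- one step of A's stripping loop; state = (line_without_strings, in_string, string_char);
-- Python's string_char is '' or a 1-char string: ported as Option Char (char == '' is always False)
def usStepA (st : List Char × Bool × Option Char) (char : Char) : List Char × Bool × Option Char :=
  let st1 : Bool × Option Char :=
    if (char == '"' || char == '\'') && !st.2.1 then (true, some char)
    else if (some char == st.2.2) && st.2.1 then (false, none)
    else st.2
  if !st1.1 then (st.1 ++ [char], st1) else (st.1, st1)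

-- A's tail: index = find('#'); if index != -1: truncate; then ';' membership
def usPostA (xs : List Char) : Bool :=
  let index := PySem.Chars.find xs ['#']
  let xs' := if index ≠ -1 then PySem.Chars.slice xs none (some index) else xs
  PySem.Chars.isIn [';'] xs'

def unnecessary_semicolon (line : String) : Bool :=
  usPostA (line.toList.foldl usStepA ([], false, none)).1

-- ===== PORT B =====
-- Source B's loop with early returns, as structural recursion; state = the open quote (None ↦ none)
def usScan : Option Char → List Char → Bool
  | _, [] => false
  | none, char :: rest =>
      if char == '#' then false
      else if char == ';' then true
      else if char == '"' || char == '\'' then usScan (some char) rest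
      else usScan none rest
  | some q, char :: rest =>
      if char == q then usScan none rest else usScan (some q) rest

def unnecessary_semicolon_alt (line : String) : Bool := usScan none line.toList

-- ===== PRECONDITION & SPEC =====
def Spec_unnecessary_semicolon (line : String) (out : Bool) : Prop := out = unnecessary_semicolon_alt line
instance (line : String) (out : Bool) : Decidable (Spec_unnecessary_semicolon line out) := by unfold Spec_unnecessary_semicolon; infer_instance

-- ===== CLAIM (what is proved, stated in full; the proofs are below) =====
def Claim_equal_unnecessary_semicolon : Prop := ∀ (line : String), Dom_unnecessary_semicolon line → Spec_unnecessary_semicolon line (unnecessary_semicolon line)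

-- ===== LEMMAS AND PROOFS =====

-- the stripped string A's loop produces, as a recursion on the input
def usProduce : Option Char → List Char → List Char
  | _, [] => []
  | none, c :: r => if c == '"' || c == '\'' then usProduce (some c) r else c :: usProduce none r
  | some q, c :: r => if c == q then c :: usProduce none r else usProduce (some q) r

theorem usFoldl_produce (l : List Char) (out : List Char) (q : Option Char) :
    (l.foldl usStepA (out, q.isSome, q)).1 = out ++ usProduce q l := by
  induction l generalizing out q with
  | nil => cases q <;> simp [usProduce]
  | cons c r ih =>
    cases q with
    | none =>
      by_cases hc : c == '"' || c == '\''
      · simpa [usStepA, usProduce, hc] using ih out (some c)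
      · simpa [usStepA, usProduce, hc] using ih (out ++ [c]) none
    | some q' =>
      by_cases hc : c == q'
      · simpa [usStepA, usProduce, hc, List.append_assoc] using ih (out ++ [c]) none
      · simpa [usStepA, usProduce, hc] using ih out (some q')

theorem usSingleton_infix (a : Char) (l : List Char) : [a] <:+: l ↔ a ∈ l := by
  constructor
  · intro h; exact h.sublist.subset (by simp)
  · intro h
    obtain ⟨s, t, rfl⟩ := List.append_of_mem h
    exact ⟨s, t, by simp⟩

theorem usIsIn_semi (l : List Char) : PySem.Chars.isIn [';'] l = decide (';' ∈ l) := by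
  by_cases h : ';' ∈ l
  · simp [h, (PySem.Chars.isIn_iff_infix _ _).mpr ((usSingleton_infix _ _).mpr h)]
  · simp [h, (PySem.Chars.isIn_eq_false_iff _ _).mpr (fun hin => h ((usSingleton_infix _ _).mp hin))]

theorem usFind_cons (c : Char) (r : List Char) :
    PySem.Chars.find (c :: r) ['#'] =
      if c = '#' then 0
      else if PySem.Chars.find r ['#'] = -1 then -1
      else PySem.Chars.find r ['#'] + 1 := by
  by_cases hc : c = '#'
  · subst hc
    rw [if_pos rfl]
    have hin : ['#'] <:+: ('#' :: r) := (usSingleton_infix _ _).mpr (by simp)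
    have h0 : 0 ≤ PySem.Chars.find ('#' :: r) ['#'] := (PySem.Chars.find_nonneg_iff _ _).mpr hin
    obtain ⟨h1, h2⟩ := PySem.Chars.find_spec h0
    by_contra hne
    have hpos : 0 < (PySem.Chars.find ('#' :: r) ['#']).toNat := by omega
    exact h2 0 hpos ⟨r, rfl⟩
  · rw [if_neg hc]
    by_cases hr : PySem.Chars.find r ['#'] = -1
    · rw [if_pos hr]
      have hnr : ¬ ['#'] <:+: r := (PySem.Chars.find_eq_neg_one_iff _ _).mp hr
      refine (PySem.Chars.find_eq_neg_one_iff _ _).mpr ?_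
      intro h
      rcases List.mem_cons.mp ((usSingleton_infix _ _).mp h) with h' | h'
      · exact hc h'.symm
      · exact hnr ((usSingleton_infix _ _).mpr h')
    · rw [if_neg hr]
      have h0r : 0 ≤ PySem.Chars.find r ['#'] := by
        have := PySem.Chars.neg_one_le_find r ['#']; omega
      obtain ⟨hr1, hr2⟩ := PySem.Chars.find_spec h0r
      have hmem : '#' ∈ r :=
        (usSingleton_infix _ _).mp ((PySem.Chars.find_nonneg_iff _ _).mp h0r)
      have hin : ['#'] <:+: (c :: r) :=
        (usSingleton_infix _ _).mpr (List.mem_cons_of_mem _ hmem)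
      have h0 : 0 ≤ PySem.Chars.find (c :: r) ['#'] := (PySem.Chars.find_nonneg_iff _ _).mpr hin
      obtain ⟨h1, h2⟩ := PySem.Chars.find_spec h0
      set f := (PySem.Chars.find (c :: r) ['#']).toNat with hf
      set k := (PySem.Chars.find r ['#']).toNat with hk
      have hfne : f ≠ 0 := by
        intro h0f
        rw [h0f, List.drop_zero] at h1
        obtain ⟨t, ht⟩ := h1
        simp only [List.cons_append, List.nil_append] at ht
        injection ht with hh _
        exact hc hh.symm
      obtain ⟨m, hm⟩ : ∃ m, f = m + 1 := ⟨f - 1, by omega⟩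
      have hprefix : ['#'] <+: r.drop m := by
        have : (c :: r).drop (m + 1) = r.drop m := rfl
        rw [hm, this] at h1; exact h1
      have hkm : k ≤ m := by
        by_contra hlt
        exact hr2 m (by omega) hprefix
      have hmk : m ≤ k := by
        have hpre : ['#'] <+: (c :: r).drop (k + 1) := hr1
        by_contra hlt
        exact h2 (k + 1) (by omega) hpre
      have : f = k + 1 := by omega
      omega
  
theorem usPostA_cons (c : Char) (r : List Char) :
    usPostA (c :: r) = if c = '#' then false else if c = ';' then true else usPostA r := by
  simp only [usPostA]
  rw [usFind_cons]
  by_cases hc : c = '#'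
  · rw [if_pos hc, if_pos (show (0 : Int) ≠ -1 by decide), if_pos hc]
    simp [PySem.List.slice_to, usIsIn_semi]
  · rw [if_neg hc, if_neg hc]
    by_cases hr : PySem.Chars.find r ['#'] = -1
    · rw [if_pos hr, if_neg (show ¬ ((-1 : Int) ≠ -1) from fun h => h rfl),
        if_neg (not_not.mpr hr)]
      by_cases hsc : c = ';'
      · simp [usIsIn_semi, hsc]
      · simp [usIsIn_semi, List.mem_cons, hsc, show ¬ (';' = c) from fun h => hsc h.symm]
    · have h0r : 0 ≤ PySem.Chars.find r ['#'] := by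
        have := PySem.Chars.neg_one_le_find r ['#']; omega
      rw [if_neg hr, if_pos (show PySem.Chars.find r ['#'] + 1 ≠ -1 by omega), if_pos hr]
      obtain ⟨k, hk⟩ : ∃ k : ℕ, PySem.Chars.find r ['#'] = (k : Int) :=
        ⟨(PySem.Chars.find r ['#']).toNat, (Int.toNat_of_nonneg h0r).symm⟩
      rw [hk]
      have hcast : ((k : Int) + 1) = ((k + 1 : ℕ) : Int) := by push_cast; ring
      rw [hcast]
      simp only [PySem.Chars.slice_eq_listSlice, PySem.List.slice_to_natCast]
      rw [List.take_succ_cons]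
      by_cases hsc : c = ';'
      · simp [usIsIn_semi, hsc]
      · simp [usIsIn_semi, List.mem_cons, hsc, show ¬ (';' = c) from fun h => hsc h.symm]

theorem usPostA_produce (l : List Char) (q : Option Char)
    (hq : q = none ∨ q = some '"' ∨ q = some '\'') :
    usPostA (usProduce q l) = usScan q l := by
  have hnil : usPostA [] = false := by decide
  induction l generalizing q with
  | nil => cases q <;> simp [usProduce, usScan, hnil]
  | cons c r ih =>
    rcases hq with hq | hq | hq
    · subst hq
      by_cases hquote : c = '"' ∨ c = '\''
      · have hb : (c == '"' || c == '\'') = true := by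
          rcases hquote with h | h <;> simp [h]
        have h1 : (c == '#') = false := by
          rcases hquote with h | h <;> subst h <;> decide
        have h2 : (c == ';') = false := by
          rcases hquote with h | h <;> subst h <;> decide
        simp only [usProduce, usScan, hb, if_true, h1, h2, Bool.false_eq_true, if_false]
        exact ih (some c) (by rcases hquote with h | h <;> subst h <;> simp)
      · have hb : (c == '"' || c == '\'') = false := by
          simp only [Bool.or_eq_false_iff, beq_eq_false_iff_ne, ne_eq]
          exact ⟨fun h => hquote (Or.inl h), fun h => hquote (Or.inr h)⟩
        simp only [usProduce, usScan, hb, Bool.false_eq_true, if_false]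
        rw [usPostA_cons]
        by_cases h1 : c = '#'
        · simp [h1]
        · rw [if_neg h1, if_neg (show ¬ ((c == '#') = true) by simpa using h1)]
          by_cases h2 : c = ';'
          · simp [h2]
          · rw [if_neg h2, if_neg (show ¬ ((c == ';') = true) by simpa using h2)]
            exact ih none (Or.inl rfl)
    · subst hq
      by_cases hc : c = '"'
      · subst hc
        simp only [usProduce, usScan, BEq.rfl, if_true]
        rw [usPostA_cons, if_neg (by decide), if_neg (by decide)]
        exact ih none (Or.inl rfl)
      · have hb : (c == '"') = false := by simpa using hc
        simp only [usProduce, usScan, hb, Bool.false_eq_true, if_false]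
        exact ih (some '"') (Or.inr (Or.inl rfl))
    · subst hq
      by_cases hc : c = '\''
      · subst hc
        simp only [usProduce, usScan, BEq.rfl, if_true]
        rw [usPostA_cons, if_neg (by decide), if_neg (by decide)]
        exact ih none (Or.inl rfl)
      · have hb : (c == '\'') = false := by simpa using hc
        simp only [usProduce, usScan, hb, Bool.false_eq_true, if_false]
        exact ih (some '\'') (Or.inr (Or.inr rfl))

theorem unnecessary_semicolon_spec : Claim_equal_unnecessary_semicolon := by
  intro line _
  unfold Spec_unnecessary_semicolon unnecessary_semicolon unnecessary_semicolon_alt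
  have h := usFoldl_produce line.toList [] none
  simp only [Option.isSome_none] at h
  rw [h]
  simpa using usPostA_produce line.toList none (Or.inl rfl)
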